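-- pv_equiv track=rewrite | github.com/cyrichardson/docs-cloud-big-data | src/wadl2rst/wadl2rst/table.py | calculate_column_sizes
-- ===== SOURCE A (Python) =====
-- START_DELIMITER = "|"
--
-- END_DELIMITER = "|"
--
-- SEPERATOR = "|"
--
-- def calculate_column_sizes(columns, rows):
--     """ Based on the columns and their names, split the spaces reasonably evenly. """
--
--     markup_length = (len(columns) - 1) * len(SEPERATOR) + len(START_DELIMITER) + len(END_DELIMITER)
--     column_space = 80 - markup_length
--     column_sizes = []
--
--     # grab the base column sizes, adding a character for slop
--     for idx, column in enumerate(columns):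
--         column_sizes.append(len(column) + 1)
--
--     # bump out any columns as necessary
--     for row in rows:
--         for idx, words in enumerate(row):
--             if len(words) > 0:
--                 max_word_size = len(max(words, key=len))
--                 if max_word_size > column_sizes[idx]:
--                     column_sizes[idx] = max_word_size + 1
--
--     taken_space = sum(column_sizes)
--
--     if column_space < taken_space:
--         return column_sizes
--
--     for idx in range(column_space - taken_space):
--         smallest_index = column_sizes.index(min(column_sizes))
--         column_sizes[smallest_index] += 1
--
--     return column_sizes
-- ===== SOURCE B (Python) =====
-- START_DELIMITER = "|"
--
-- END_DELIMITER = "|"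
--
-- SEPERATOR = "|"
--
--
-- def _fill(sizes, level):
--     """Units needed to raise every column below `level` up to `level`."""
--     return sum(level - v for v in sizes if v < level)
--
--
-- def calculate_column_sizes(columns, rows):
--     """ Based on the columns and their names, split the spaces reasonably evenly. """
--
--     markup_length = (len(columns) - 1) * len(SEPERATOR) + len(START_DELIMITER) + len(END_DELIMITER)
--     column_space = 80 - markup_length
--     column_sizes = []
--
--     # grab the base column sizes, adding a character for slop
--     for idx, column in enumerate(columns):
--         column_sizes.append(len(column) + 1)
--
--     # bump out any columns as necessary
--     for row in rows:
--         for idx, words in enumerate(row):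
--             if len(words) > 0:
--                 max_word_size = len(max(words, key=len))
--                 if max_word_size > column_sizes[idx]:
--                     column_sizes[idx] = max_word_size + 1
--
--     k = column_space - sum(column_sizes)
--     if k < 0:
--         return column_sizes
--
--     # water-filling instead of handing out one unit at a time: find the highest
--     # level with _fill(column_sizes, level) <= k, then give the remaining units
--     # to the leftmost columns at that level (list.index(min(...)) tie-breaking).
--     level = min(column_sizes)
--     while _fill(column_sizes, level + 1) <= k:
--         level += 1
--     rem = k - _fill(column_sizes, level)
--
--     out = []
--     for v in column_sizes:
--         if v <= level:
--             if rem > 0: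
--                 out.append(level + 1)
--                 rem -= 1
--             else:
--                 out.append(level)
--         else:
--             out.append(v)
--     return out
-- ===== Notes on version B (the rewrite author's own statement) =====
-- stated objective: alternative
-- what changed: B keeps the markup/base-size/bump passes but replaces the final one-unit-at-a-time levelling loop (a full min()+list.index() scan of the sizes per distributed unit) with a water-filling computation: find the final level L with _fill(sizes, L) <= k < _fill(sizes, L+1), then rebuild the list in one pass, raising every column below L to L and handing the k - _fill(sizes, L) leftover units to the leftmost columns at the level (mirroring list.index(min(...)) tie-breaking).
import Mathlib
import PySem

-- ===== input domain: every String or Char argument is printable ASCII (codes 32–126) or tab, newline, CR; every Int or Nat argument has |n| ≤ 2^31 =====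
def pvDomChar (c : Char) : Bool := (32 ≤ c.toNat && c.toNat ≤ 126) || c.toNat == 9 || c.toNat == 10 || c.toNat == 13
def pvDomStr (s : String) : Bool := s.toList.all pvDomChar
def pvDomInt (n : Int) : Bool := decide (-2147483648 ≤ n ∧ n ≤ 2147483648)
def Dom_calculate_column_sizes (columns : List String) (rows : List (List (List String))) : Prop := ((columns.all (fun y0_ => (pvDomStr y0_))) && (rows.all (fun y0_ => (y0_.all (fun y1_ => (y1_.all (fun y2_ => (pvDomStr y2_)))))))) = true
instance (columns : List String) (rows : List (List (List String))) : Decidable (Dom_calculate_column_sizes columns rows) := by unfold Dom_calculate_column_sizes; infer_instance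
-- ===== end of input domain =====

-- B keeps A's base-size and bump passes but replaces the one-unit-at-a-time levelling
-- loop (a min+index scan per distributed unit) by a water-filling computation of the
-- final level; objective: alternative algorithm.

-- ===== PORT A =====
-- len(max(words, key=len)) for a non-empty cell (first extremal word, then its length)
def csA_maxWordLen (ws : List String) : Int :=
  match PySem.List.max? ws (fun w => PySem.Str.len w) with
  | some w => PySem.Str.len w
  | none => 0   -- unreachable: guarded by len(words) > 0

-- body of A's bump loop for one (idx, words) pair; pyGet? = none is Python's IndexError
-- (excluded by Pre_), the port then leaves the sizes unchanged
def csA_bumpCell (s : List Int) (idx : Int) (words : List String) : List Int :=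
  if words.length > 0 then
    match PySem.List.pyGet? s idx with
    | none => s
    | some cur =>
      let m := csA_maxWordLen words
      if m > cur then s.set idx.toNat (m + 1) else s
  else s

-- one iteration of A's levelling loop: column_sizes[column_sizes.index(min(column_sizes))] += 1
-- (min of [] is Python's ValueError, excluded by Pre_; the port returns s unchanged there)
def csA_bumpMin (s : List Int) : List Int :=
  match PySem.List.min? s (fun v => v) with
  | none => s
  | some m =>
    match PySem.List.index? s m with
    | none => s
    | some i => s.set i (m + 1)

-- for idx in range(column_space - taken_space): … (range of a non-positive bound is empty)
def csA_level : Nat → List Int → List Int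
  | 0, s => s
  | k + 1, s => csA_level k (csA_bumpMin s)

def calculate_column_sizes (columns : List String) (rows : List (List (List String))) : List Int :=
  let markup : Int := ((PySem.List.len columns) - 1) * 1 + 1 + 1
  let column_space : Int := 80 - markup
  let base := columns.map (fun c => PySem.Str.len c + 1)
  let sizes := rows.foldl
    (fun s row => (PySem.List.enumerate row 0).foldl (fun s p => csA_bumpCell s p.1 p.2) s) base
  let taken := sizes.sum
  if column_space < taken then sizes
  else csA_level (column_space - taken).toNat sizes

-- ===== PORT B =====
-- len(max(words, key=len)) for a non-empty cell (same expression as in A's bump pass)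
def csB_maxWordLen (ws : List String) : Int :=
  match PySem.List.max? ws (fun w => PySem.Str.len w) with
  | some w => PySem.Str.len w
  | none => 0   -- unreachable: guarded by len(words) > 0

-- body of Source B's bump loop for one (idx, words) pair; pyGet? = none is Python's
-- IndexError (excluded by Pre_), the port then leaves the sizes unchanged
def csB_bumpCell (s : List Int) (idx : Int) (words : List String) : List Int :=
  if words.length > 0 then
    match PySem.List.pyGet? s idx with
    | none => s
    | some cur =>
      let m := csB_maxWordLen words
      if m > cur then s.set idx.toNat (m + 1) else s
  else s

-- _fill(sizes, level)
def csB_fill (s : List Int) (level : Int) : Int :=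
  s.foldl (fun acc v => acc + (if v < level then level - v else 0)) 0

-- the while loop 'while _fill(column_sizes, level + 1) <= k: level += 1', with fuel;
-- fuel k.toNat + 1 is enough (csB_findL_spec below), so the port equals Source B's loop
def csB_findL (s : List Int) (k : Int) : Nat → Int → Int
  | 0, level => level
  | fuel + 1, level =>
    if csB_fill s (level + 1) ≤ k then csB_findL s k fuel (level + 1) else level

-- the final distribution loop of Source B (rem leftmost columns at the level get one extra unit)
def csB_assign (s : List Int) (level : Int) (rem : Int) : List Int :=
  match s with
  | [] => []
  | v :: vs =>
    if v ≤ level then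
      if 0 < rem then (level + 1) :: csB_assign vs level (rem - 1)
      else level :: csB_assign vs level rem
    else v :: csB_assign vs level rem

def calculate_column_sizes_alt (columns : List String) (rows : List (List (List String))) : List Int :=
  let markup : Int := ((PySem.List.len columns) - 1) * 1 + 1 + 1
  let column_space : Int := 80 - markup
  let base := columns.map (fun c => PySem.Str.len c + 1)
  let sizes := rows.foldl
    (fun s row => (PySem.List.enumerate row 0).foldl (fun s p => csB_bumpCell s p.1 p.2) s) base
  let k := column_space - sizes.sum
  if k < 0 then sizes
  else
    match PySem.List.min? sizes (fun v => v) with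
    | none => sizes   -- min of [] raises in Python; excluded by Pre_
    | some m0 =>
      let level := csB_findL sizes k (k.toNat + 1) m0
      csB_assign sizes level (k - csB_fill sizes level)

-- ===== PRECONDITION & SPEC =====
-- Exactly where Python A returns: with columns = [] the levelling loop hits min([]) (ValueError),
-- and a row cell beyond the columns that is non-empty hits column_sizes[idx] (IndexError).
def Pre_calculate_column_sizes (columns : List String) (rows : List (List (List String))) : Prop :=
  columns ≠ [] ∧ ∀ row ∈ rows, ∀ cell ∈ row.drop columns.length, cell = []

instance (columns : List String) (rows : List (List (List String))) : Decidable (Pre_calculate_column_sizes columns rows) := by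
  unfold Pre_calculate_column_sizes; infer_instance

def pvWitness_calculate_column_sizes : List String × List (List (List String)) :=
  (["name", "value"], [[["alpha", "bb"], ["ccc"]], [[], ["dd"]]])

def Spec_calculate_column_sizes (columns : List String) (rows : List (List (List String))) (out : List Int) : Prop := out = calculate_column_sizes_alt columns rows
instance (columns : List String) (rows : List (List (List String))) (out : List Int) : Decidable (Spec_calculate_column_sizes columns rows out) := by unfold Spec_calculate_column_sizes; infer_instance

-- ===== CLAIM (what is proved, stated in full; the proofs are below) =====
def Claim_equal_calculate_column_sizes : Prop := ∀ (columns : List String) (rows : List (List (List String))), Dom_calculate_column_sizes columns rows → Pre_calculate_column_sizes columns rows → Spec_calculate_column_sizes columns rows (calculate_column_sizes columns rows)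

-- ===== LEMMAS AND PROOFS =====

theorem pv_witness_ok :
    Dom_calculate_column_sizes pvWitness_calculate_column_sizes.1 pvWitness_calculate_column_sizes.2 ∧
    Pre_calculate_column_sizes pvWitness_calculate_column_sizes.1 pvWitness_calculate_column_sizes.2 := by
  constructor <;> decide

def csCnt (s : List Int) (level : Int) : Int := (s.countP (fun v => decide (v ≤ level)) : Int)

theorem csA_bumpCell_length (s : List Int) (idx : Int) (words : List String) :
    (csA_bumpCell s idx words).length = s.length := by
  unfold csA_bumpCell
  split
  · split
    · rfl
    · show (if csA_maxWordLen words > _ then s.set idx.toNat (csA_maxWordLen words + 1) else s).length = s.length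
      split
      · simp
      · rfl
  · rfl

theorem csA_inner_length (row : List (List String)) : ∀ (a : Int) (s : List Int),
    ((PySem.List.enumerate row a).foldl (fun s p => csA_bumpCell s p.1 p.2) s).length = s.length := by
  induction row with
  | nil => intro a s; rw [PySem.List.enumerate_nil]; rfl
  | cons c rest ih =>
    intro a s
    rw [PySem.List.enumerate_cons, List.foldl_cons, ih (a + 1)]
    exact csA_bumpCell_length s a c

theorem csA_firstpass_length (rows : List (List (List String))) : ∀ (s : List Int),
    (rows.foldl
      (fun s row => (PySem.List.enumerate row 0).foldl (fun s p => csA_bumpCell s p.1 p.2) s)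
      s).length = s.length := by
  induction rows with
  | nil => intro s; rfl
  | cons row rest ih =>
    intro s
    rw [List.foldl_cons, ih, csA_inner_length row 0 s]

theorem csB_assign_cons (v : Int) (vs : List Int) (L r : Int) :
    csB_assign (v :: vs) L r =
      if v ≤ L then
        if 0 < r then (L + 1) :: csB_assign vs L (r - 1)
        else L :: csB_assign vs L r
      else v :: csB_assign vs L r := rfl


theorem csB_fill_cons (v : Int) (vs : List Int) (L : Int) :
    csB_fill (v :: vs) L = (if v < L then L - v else 0) + csB_fill vs L := by
  unfold csB_fill
  rw [List.foldl_cons, PySem.List.foldl_add, PySem.List.foldl_add]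
  ring

theorem csB_fill_nonneg (s : List Int) (L : Int) : 0 ≤ csB_fill s L := by
  induction s with
  | nil => simp [csB_fill]
  | cons v vs ih => rw [csB_fill_cons]; split <;> omega

theorem csCnt_cons (v : Int) (vs : List Int) (L : Int) :
    csCnt (v :: vs) L = (if v ≤ L then 1 else 0) + csCnt vs L := by
  unfold csCnt
  rw [List.countP_cons]
  split <;> simp_all <;> omega

theorem csCnt_nonneg (s : List Int) (L : Int) : 0 ≤ csCnt s L := by
  unfold csCnt; positivity

theorem csB_fill_succ (s : List Int) (L : Int) :
    csB_fill s (L + 1) = csB_fill s L + csCnt s L := by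
  induction s with
  | nil => simp [csB_fill, csCnt]
  | cons v vs ih =>
    rw [csB_fill_cons, csB_fill_cons, csCnt_cons, ih]
    split_ifs <;> omega

theorem csB_fill_eq_zero (s : List Int) (L : Int) (h : csB_fill s L = 0) :
    ∀ v ∈ s, L ≤ v := by
  induction s with
  | nil => simp
  | cons w ws ih =>
    rw [csB_fill_cons] at h
    have hnn := csB_fill_nonneg ws L
    intro v hv
    rcases List.mem_cons.mp hv with rfl | hv'
    · by_contra hc; rw [if_pos (by omega)] at h; omega
    · apply ih ?_ v hv'
      split_ifs at h <;> omega

theorem csB_assign_self (s : List Int) (L : Int) (h : ∀ v ∈ s, L ≤ v) :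
    csB_assign s L 0 = s := by
  induction s with
  | nil => rfl
  | cons v vs ih =>
    rw [csB_assign_cons]
    have hv := h v (by simp)
    by_cases hvl : v ≤ L
    · have hveq : v = L := le_antisymm hvl hv
      subst hveq
      rw [if_pos le_rfl, if_neg (lt_irrefl 0), ih (fun w hw => h w (by simp [hw]))]
    · rw [if_neg hvl, ih (fun w hw => h w (by simp [hw]))]

theorem csB_assign_lb (s : List Int) (L r : Int) :
    ∀ v ∈ csB_assign s L r, L ≤ v ∨ v ∈ s ∧ L < v := by
  induction s generalizing r with
  | nil => simp [csB_assign]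
  | cons w ws ih =>
    intro v hv
    rw [csB_assign_cons] at hv
    split_ifs at hv with h1 h2
    · rcases List.mem_cons.mp hv with rfl | h
      · left; omega
      · rcases ih (r-1) v h with h' | h'
        · left; exact h'
        · right; exact ⟨by simp [h'.1], h'.2⟩
    · rcases List.mem_cons.mp hv with rfl | h
      · left; omega
      · rcases ih r v h with h' | h'
        · left; exact h'
        · right; exact ⟨by simp [h'.1], h'.2⟩
    · rcases List.mem_cons.mp hv with rfl | h
      · right; exact ⟨by simp, by omega⟩
      · rcases ih r v h with h' | h'
        · left; exact h'
        · right; exact ⟨by simp [h'.1], h'.2⟩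

theorem csB_fill_zero_of (s : List Int) (L : Int) (h : ∀ v ∈ s, L ≤ v) : csB_fill s L = 0 := by
  induction s with
  | nil => rfl
  | cons v vs ih =>
    rw [csB_fill_cons, if_neg (by have := h v (by simp); omega),
      ih (fun w hw => h w (by simp [hw]))]
    norm_num

theorem csCnt_pos (s : List Int) (L v : Int) (hv : v ∈ s) (hvL : v ≤ L) : 1 ≤ csCnt s L := by
  unfold csCnt
  have : 0 < s.countP (fun v => decide (v ≤ L)) := List.countP_pos_iff.mpr ⟨v, hv, by simpa⟩
  omega

theorem index?_assign (s : List Int) (L : Int) : ∀ r : Int, 0 ≤ r → r < csCnt s L →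
    ∃ i, PySem.List.index? (csB_assign s L r) L = some i ∧
      (csB_assign s L r).set i (L + 1) = csB_assign s L (r + 1) := by
  induction s with
  | nil => intro r h1 h2; simp [csCnt] at h2; omega
  | cons v vs ih =>
    intro r h1 h2
    rw [csCnt_cons] at h2
    by_cases hv : v ≤ L
    · by_cases hr : 0 < r
      · obtain ⟨i, hi, hset⟩ := ih (r - 1) (by omega) (by rw [if_pos hv] at h2; omega)
        have hL : csB_assign (v :: vs) L r = (L + 1) :: csB_assign vs L (r - 1) := by
          rw [csB_assign_cons, if_pos hv, if_pos hr]
        have hR : csB_assign (v :: vs) L (r + 1) = (L + 1) :: csB_assign vs L r := by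
          rw [csB_assign_cons, if_pos hv, if_pos (by omega : (0:Int) < r + 1)]
          norm_num
        refine ⟨i + 1, ?_, ?_⟩
        · rw [hL, PySem.List.index?_cons_of_ne _ (by omega), hi]
          rfl
        · rw [hL, hR, List.set_cons_succ, hset]
          have : r - 1 + 1 = r := by ring
          rw [this]
      · have hr0 : r = 0 := by omega
        subst hr0
        have hL : csB_assign (v :: vs) L 0 = L :: csB_assign vs L 0 := by
          rw [csB_assign_cons, if_pos hv, if_neg (lt_irrefl 0)]
        have hR : csB_assign (v :: vs) L (0 + 1) = (L + 1) :: csB_assign vs L 0 := by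
          rw [csB_assign_cons, if_pos hv, if_pos (by norm_num : (0:Int) < 0 + 1)]
          norm_num
        refine ⟨0, ?_, ?_⟩
        · rw [hL]; exact PySem.List.index?_cons_self L _
        · rw [hL, hR, List.set_cons_zero]
    · obtain ⟨i, hi, hset⟩ := ih r h1 (by rw [if_neg hv] at h2; omega)
      have hL : csB_assign (v :: vs) L r = v :: csB_assign vs L r := by
        rw [csB_assign_cons, if_neg hv]
      have hR : csB_assign (v :: vs) L (r + 1) = v :: csB_assign vs L (r + 1) := by
        rw [csB_assign_cons, if_neg hv]
      refine ⟨i + 1, ?_, ?_⟩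
      · rw [hL, PySem.List.index?_cons_of_ne _ (by omega), hi]
        rfl
      · rw [hL, hR, List.set_cons_succ, hset]

theorem csA_bumpMin_assign (s : List Int) (L r : Int) (hr : 0 ≤ r) (hcnt : r < csCnt s L) :
    csA_bumpMin (csB_assign s L r) = csB_assign s L (r + 1) := by
  obtain ⟨i, hi, hset⟩ := index?_assign s L r hr hcnt
  have hLmem : L ∈ csB_assign s L r := by
    rw [← PySem.List.index?_isSome_iff, hi]; rfl
  rcases hmin : PySem.List.min? (csB_assign s L r) (fun v => v) with _ | m
  · rw [PySem.List.min?_eq_none_iff] at hmin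
    rw [hmin] at hLmem; simp at hLmem
  · have hm : m = L := by
      have h1 : m ≤ L := PySem.List.min?_isMin hmin L hLmem
      have h2 : L ≤ m := by
        rcases csB_assign_lb s L r m (PySem.List.min?_mem hmin) with h | h
        · exact h
        · omega
      omega
    subst hm
    simp only [csA_bumpMin, hmin, hi, hset]

theorem csB_assign_shift (s : List Int) (L : Int) : ∀ r : Int, csCnt s L ≤ r →
    csB_assign s L r = csB_assign s (L + 1) 0 := by
  induction s with
  | nil => intro r _; rfl
  | cons v vs ih =>
    intro r hr
    rw [csCnt_cons] at hr
    have hcnn := csCnt_nonneg vs L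
    rw [csB_assign_cons, csB_assign_cons]
    by_cases hv : v ≤ L
    · rw [if_pos hv] at hr
      rw [if_pos hv, if_pos (by omega : (0:Int) < r), if_pos (by omega : v ≤ L + 1),
        if_neg (lt_irrefl 0), ih (r - 1) (by omega)]
    · rw [if_neg hv] at hr
      by_cases hv1 : v ≤ L + 1
      · have hveq : v = L + 1 := by omega
        rw [if_neg hv, if_pos hv1, if_neg (lt_irrefl 0), ih r (by omega), hveq]
      · rw [if_neg hv, if_neg hv1, ih r (by omega)]

theorem csA_level_comm (k : Nat) : ∀ s : List Int,
    csA_level k (csA_bumpMin s) = csA_bumpMin (csA_level k s) := by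
  induction k with
  | zero => intro s; rfl
  | succ k ih => intro s; show csA_level k _ = _; rw [ih (csA_bumpMin s)]; rfl

theorem main_level (s : List Int) :
    ∀ (kn : Nat) (L r : Int), 0 ≤ r → r < csCnt s L → csB_fill s L + r = (kn : Int) →
      csA_level kn s = csB_assign s L r := by
  intro kn
  induction kn with
  | zero =>
    intro L r h1 h2 h3
    have hf := csB_fill_nonneg s L
    have hr0 : r = 0 := by omega
    have hf0 : csB_fill s L = 0 := by omega
    subst hr0
    rw [csB_assign_self s L (csB_fill_eq_zero s L hf0)]
    rfl
  | succ kn ih =>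
    intro L r h1 h2 h3
    have hstep : csA_level (kn + 1) s = csA_bumpMin (csA_level kn s) := by
      show csA_level kn (csA_bumpMin s) = _; exact csA_level_comm kn s
    by_cases hr : 0 < r
    · rw [hstep, ih L (r - 1) (by omega) (by omega) (by push_cast; omega)]
      rw [csA_bumpMin_assign s L (r - 1) (by omega) (by omega)]
      norm_num
    · have hr0 : r = 0 := by omega
      subst hr0
      have hfpos : 0 < csB_fill s L := by push_cast at h3; omega
      have hc1 : 1 ≤ csCnt s (L - 1) := by
        by_contra hc
        have hcz : s.countP (fun v => decide (v ≤ L - 1)) = 0 := by unfold csCnt at hc; omega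
        have : ∀ v ∈ s, L ≤ v := by
          intro v hv
          have := List.countP_eq_zero.mp hcz v hv
          simp at this; omega
        have := csB_fill_zero_of s L this
        omega
      have hfs : csB_fill s L = csB_fill s (L - 1) + csCnt s (L - 1) := by
        have := csB_fill_succ s (L - 1)
        simpa using this
      rw [hstep, ih (L - 1) (csCnt s (L - 1) - 1) (by omega) (by omega) (by push_cast at h3 ⊢; omega)]
      rw [csA_bumpMin_assign s (L - 1) _ (by omega) (by omega)]
      have := csB_assign_shift s (L - 1) (csCnt s (L - 1)) (by omega)
      simpa using this

theorem csB_findL_spec (s : List Int) (k : Int) :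
    ∀ (fuel : Nat) (L : Int), (∃ v ∈ s, v ≤ L) → csB_fill s L ≤ k →
      (k - csB_fill s L).toNat < fuel →
      csB_fill s (csB_findL s k fuel L) ≤ k ∧ k < csB_fill s (csB_findL s k fuel L + 1) ∧
        (∃ v ∈ s, v ≤ csB_findL s k fuel L) := by
  intro fuel
  induction fuel with
  | zero => intro L _ _ h; omega
  | succ fuel ih =>
    intro L hex hle hfuel
    obtain ⟨v, hv, hvL⟩ := hex
    unfold csB_findL
    by_cases h : csB_fill s (L + 1) ≤ k
    · rw [if_pos h]
      have hcnt := csCnt_pos s L v hv hvL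
      have hsucc := csB_fill_succ s L
      exact ih (L + 1) ⟨v, hv, by omega⟩ h (by omega)
    · rw [if_neg h]
      exact ⟨hle, by omega, ⟨v, hv, hvL⟩⟩

-- ===== VERDICT (by name: the statement is the Claim_ definition above) =====
theorem calculate_column_sizes_spec : Claim_equal_calculate_column_sizes := by
  intro columns rows _hdom hpre
  obtain ⟨hcols, _hrows⟩ := hpre
  unfold Spec_calculate_column_sizes
  simp only [calculate_column_sizes, calculate_column_sizes_alt]
  have hbump : csB_bumpCell = csA_bumpCell := rfl
  rw [hbump]
  set sizes := rows.foldl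
    (fun s row => (PySem.List.enumerate row 0).foldl (fun s p => csA_bumpCell s p.1 p.2) s)
    (columns.map (fun c => PySem.Str.len c + 1)) with hsizes
  set space : Int := 80 - (((PySem.List.len columns) - 1) * 1 + 1 + 1) with hspace
  by_cases hcmp : space < sizes.sum
  · rw [if_pos hcmp, if_pos (by omega : space - sizes.sum < 0)]
  · rw [if_neg hcmp, if_neg (by omega : ¬ space - sizes.sum < 0)]
    set k : Int := space - sizes.sum with hk
    have hk0 : 0 ≤ k := by omega
    have hne : sizes ≠ [] := by
      rw [hsizes, ← List.length_pos_iff, csA_firstpass_length]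
      simp only [List.length_map]
      cases columns with
      | nil => exact absurd rfl hcols
      | cons c cs => simp
    rcases hmin : PySem.List.min? sizes (fun v => v) with _ | m0
    · exact absurd ((PySem.List.min?_eq_none_iff _ _).mp hmin) hne
    have hm0mem : m0 ∈ sizes := PySem.List.min?_mem hmin
    have hm0min : ∀ v ∈ sizes, m0 ≤ v := PySem.List.min?_isMin hmin
    have hfill0 : csB_fill sizes m0 = 0 := csB_fill_zero_of sizes m0 hm0min
    obtain ⟨hle, hlt, _⟩ := csB_findL_spec sizes k (k.toNat + 1) m0 ⟨m0, hm0mem, le_rfl⟩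
      (by omega) (by omega)
    set L := csB_findL sizes k (k.toNat + 1) m0 with hL
    have hsucc := csB_fill_succ sizes L
    exact main_level sizes k.toNat L (k - csB_fill sizes L) (by omega) (by omega) (by omega)
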